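-- pv_equiv track=rewrite | github.com/fbenda/Visual_Tracking_api | CarSequence.py | processTrainData
-- ===== SOURCE A (Python) =====
-- def processTrainData(carSet, timeSet):
--     # This function creates a dictionary from two given sets.
--     # The key is the time e.g. 12:00 in str, and its value is the number of cars on the same location timelapses e.g. [0,10,4,5] in a list.
--
--     timeDict = dict()
--
--     for timeListidx in range(len(timeSet)):
--         timeList = timeSet[timeListidx]
--         for ind in range(len(timeList)):
--
--             actualTime = timeList[ind]
--             actualCarNum = carSet[timeListidx][ind]
--
--             if actualTime in timeDict:
--                 timeDict[actualTime].append(actualCarNum)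
--             else:
--                 timeDict[actualTime] = [actualCarNum]
--
--     return timeDict
-- ===== SOURCE B (Python) =====
-- def processTrainData(carSet, timeSet):
--     # Flatten into (time, carNum) pairs, then build each key's value list by a
--     # per-key filtering pass over the flat pair list (keys in first-occurrence order).
--     pairs = [(t, c) for times, cars in zip(timeSet, carSet) for t, c in zip(times, cars)]
--     keys = dict.fromkeys(t for t, _ in pairs)
--     return {t: [c for u, c in pairs if u == t] for t in keys}
-- ===== Notes on version B (the rewrite author's own statement) =====
-- stated objective: alternative
-- what changed: B flattens the two parallel list-of-lists into one (time, carNum) pair list, computes the distinct times in first-occurrence order with dict.fromkeys, and builds each key's value list by a per-key filtering pass over the pair list, instead of A's index-driven nested loops mutating a dict entry by entry.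
-- outside the precondition, e.g. on processTrainData([[1]], [['a'], ['b']]): A raises IndexError, B returns {'a': [1]}
import Mathlib
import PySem

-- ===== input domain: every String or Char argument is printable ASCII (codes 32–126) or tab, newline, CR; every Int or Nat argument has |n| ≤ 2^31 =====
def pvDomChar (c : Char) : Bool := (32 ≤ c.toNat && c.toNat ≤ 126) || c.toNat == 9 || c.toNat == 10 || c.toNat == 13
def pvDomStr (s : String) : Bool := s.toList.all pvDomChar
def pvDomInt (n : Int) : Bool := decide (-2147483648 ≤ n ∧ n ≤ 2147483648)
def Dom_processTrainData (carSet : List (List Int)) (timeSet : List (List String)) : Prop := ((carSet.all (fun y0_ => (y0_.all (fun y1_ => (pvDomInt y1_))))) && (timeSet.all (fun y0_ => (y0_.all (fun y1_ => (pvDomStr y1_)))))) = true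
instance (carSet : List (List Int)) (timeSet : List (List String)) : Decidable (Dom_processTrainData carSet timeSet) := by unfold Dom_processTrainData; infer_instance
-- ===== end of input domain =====

-- B groups by flattening to (time, carNum) pairs and doing a per-key filtering pass
-- (keys in first-occurrence order) instead of A's single pass mutating a dict: alternative decomposition, not faster.
-- ===== PORT A =====
def pvStepA (d : PySem.Dict String (List Int)) (actualTime : String) (actualCarNum : Int) :
    PySem.Dict String (List Int) :=
  if d.contains actualTime then
    d.modify actualTime [] (fun l => l ++ [actualCarNum])
  else
    d.insert actualTime [actualCarNum]

def processTrainData (carSet : List (List Int)) (timeSet : List (List String)) : List (String × List Int) :=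
  let timeDict : PySem.Dict String (List Int) :=
    (PySem.List.pyRange 0 (timeSet.length : Int) 1).foldl (fun timeDict timeListidx =>
      let timeList := PySem.List.pyGetD timeSet timeListidx []
      (PySem.List.pyRange 0 (timeList.length : Int) 1).foldl (fun timeDict ind =>
        let actualTime := PySem.List.pyGetD timeList ind ""
        let actualCarNum := PySem.List.pyGetD (PySem.List.pyGetD carSet timeListidx []) ind 0
        pvStepA timeDict actualTime actualCarNum) timeDict) (PySem.Dict.mk [])
  timeDict.items

-- ===== PORT B =====
def processTrainData_alt (carSet : List (List Int)) (timeSet : List (List String)) : List (String × List Int) :=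
  let pairs : List (String × Int) := (timeSet.zip carSet).flatMap (fun p => p.1.zip p.2)
  let keys := PySem.List.dedup (pairs.map (fun p => p.1))
  keys.map (fun t => (t, (pairs.filter (fun p => p.1 == t)).map (fun p => p.2)))

-- ===== PRECONDITION & SPEC =====
-- Pre_ excludes exactly the inputs on which A raises IndexError: carSet shorter than
-- timeSet, or some carSet[i] shorter than timeSet[i].
def Pre_processTrainData (carSet : List (List Int)) (timeSet : List (List String)) : Prop :=
  timeSet.length ≤ carSet.length ∧
    ((timeSet.zip carSet).all (fun p => p.1.length ≤ p.2.length)) = true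
instance (carSet : List (List Int)) (timeSet : List (List String)) :
    Decidable (Pre_processTrainData carSet timeSet) := by unfold Pre_processTrainData; infer_instance

def pvWitness_processTrainData : List (List Int) × List (List String) :=
  ([[1, 2], [3]], [["12:00", "12:05"], ["12:00"]])

def Spec_processTrainData (carSet : List (List Int)) (timeSet : List (List String)) (out : List (String × List Int)) : Prop := out = processTrainData_alt carSet timeSet
instance (carSet : List (List Int)) (timeSet : List (List String)) (out : List (String × List Int)) : Decidable (Spec_processTrainData carSet timeSet out) := by unfold Spec_processTrainData; infer_instance

-- ===== CLAIM (what is proved, stated in full; the proofs are below) =====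
def Claim_equal_processTrainData : Prop := ∀ (carSet : List (List Int)) (timeSet : List (List String)), Dom_processTrainData carSet timeSet → Pre_processTrainData carSet timeSet → Spec_processTrainData carSet timeSet (processTrainData carSet timeSet)

-- ===== LEMMAS AND PROOFS =====

-- values attached to key t by B's per-key filtering pass
def pvVals (pairs : List (String × Int)) (t : String) : List Int :=
  (pairs.filter (fun p => p.1 == t)).map (fun p => p.2)

-- a fold over range(len xs) reading xs[i] and ys[i] is a fold over zip xs ys
theorem pv_foldl_range_zip {α β γ : Type} (da : α) (db : β) (g : γ → α → β → γ) :
    ∀ (xs : List α) (ys : List β), xs.length ≤ ys.length → ∀ (init : γ),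
      (PySem.List.pyRange 0 (xs.length : Int) 1).foldl
          (fun acc i => g acc (PySem.List.pyGetD xs i da) (PySem.List.pyGetD ys i db)) init
        = (xs.zip ys).foldl (fun acc p => g acc p.1 p.2) init := by
  have key : ∀ (xs : List α) (ys : List β), xs.length ≤ ys.length → ∀ (init : γ),
      (List.range xs.length).foldl
          (fun acc k => g acc (xs.getD k da) (ys.getD k db)) init
        = (xs.zip ys).foldl (fun acc p => g acc p.1 p.2) init := by
    intro xs
    induction xs with
    | nil => intro ys h init; simp
    | cons x xs ih =>
      intro ys h init
      cases ys with
      | nil => simp at h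
      | cons y ys =>
        simp only [List.length_cons, List.range_succ_eq_map, List.foldl_cons, List.foldl_map,
          List.getD_cons_zero, List.getD_cons_succ, List.zip_cons_cons]
        exact ih ys (by simpa using h) (g init x y)
  intro xs ys h init
  rw [PySem.List.pyRange_zero_natCast, List.foldl_map]
  simpa only [PySem.List.pyGetD_natCast] using key xs ys h init

theorem pv_dedup_snoc {α : Type} [BEq α] [LawfulBEq α] (ks : List α) (t : α) :
    PySem.List.dedup (ks ++ [t]) =
      if t ∈ PySem.List.dedup ks then PySem.List.dedup ks
      else PySem.List.dedup ks ++ [t] := by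
  simp [PySem.List.dedup, PySem.Set.ofList, PySem.Set.add, PySem.Set.contains]

theorem pv_vals_snoc (pairs : List (String × Int)) (t : String) (c : Int) (t' : String) :
    pvVals (pairs ++ [(t, c)]) t' =
      pvVals pairs t' ++ (if t == t' then [c] else []) := by
  by_cases h : t = t' <;> simp [pvVals, List.filter_append, h]

theorem pv_find_group (keys : List String) (vals : String → List Int) (t : String)
    (h : t ∈ keys) :
    (keys.map (fun t' => (t', vals t'))).find? (fun p => p.1 == t) = some (t, vals t) := by
  induction keys with
  | nil => simp at h
  | cons k ks ih =>
    by_cases hk : k = t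
    · subst hk; simp
    · have h' : t ∈ ks := by
        rcases List.mem_cons.mp h with h | h
        · exact absurd h.symm hk
        · exact h
      simpa [List.find?_cons, hk] using ih h'

theorem pv_fold_groups (pairs : List (String × Int)) :
    pairs.foldl (fun d p => pvStepA d p.1 p.2) (PySem.Dict.mk []) =
      PySem.Dict.mk ((PySem.List.dedup (pairs.map (fun p => p.1))).map
        (fun t => (t, pvVals pairs t))) := by
  induction pairs using List.reverseRecOn with
  | nil => simp [PySem.List.dedup, PySem.Set.ofList, PySem.Set.empty, pvVals]
  | append_singleton pairs p ih =>
    obtain ⟨t, c⟩ := p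
    rw [List.foldl_append, List.foldl_cons, List.foldl_nil, ih]
    set keys := PySem.List.dedup (pairs.map (fun p => p.1)) with hkeys
    by_cases hmem : t ∈ keys
    · have hc2 : (PySem.Dict.mk (keys.map (fun t' => (t', pvVals pairs t')))).contains t = true := by
        simp only [PySem.Dict.contains, List.any_eq_true]
        exact ⟨(t, pvVals pairs t), List.mem_map_of_mem hmem, by simp⟩
      have hfind := pv_find_group keys (pvVals pairs) t hmem
      have hk' : PySem.List.dedup ((pairs ++ [(t, c)]).map (fun p => p.1)) = keys := by
        rw [List.map_append, List.map_cons, List.map_nil, pv_dedup_snoc, ← hkeys, if_pos hmem]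
      simp only [pvStepA, hc2, if_pos, PySem.Dict.modify, PySem.Dict.getD, PySem.Dict.get?,
        hfind, PySem.Dict.insert, hk']
      congr 1
      rw [List.map_map]
      apply List.map_congr_left
      intro t' _
      by_cases ht' : t' = t
      · subst ht'; simp [pv_vals_snoc]
      · have hb : (t' == t) = false := by simpa using ht'
        have hb2 : (t == t') = false := by simpa using fun h => ht' h.symm
        simp [pv_vals_snoc, hb2]
        intro h
        exact absurd h ht'
    · have hc2 : (PySem.Dict.mk (keys.map (fun t' => (t', pvVals pairs t')))).contains t = false := by
        simp only [PySem.Dict.contains, List.any_eq_false]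
        rintro ⟨t', v⟩ hp
        simp only [List.mem_map] at hp
        obtain ⟨u, hu, he⟩ := hp
        have : t' = u := by cases he; rfl
        subst this
        have hne : ¬ t' = t := fun h => hmem (h ▸ hu)
        simpa using hne
      have hk' : PySem.List.dedup (pairs.map (fun p => p.1) ++ [t]) = keys ++ [t] := by
        rw [pv_dedup_snoc, ← hkeys, if_neg hmem]
      have htnot : t ∉ pairs.map (fun p => p.1) := fun hx =>
        hmem ((PySem.Set.mem_ofList _ _).mpr hx)
      have hvalt : pvVals pairs t = [] := by
        simp only [pvVals, List.map_eq_nil_iff, List.filter_eq_nil_iff]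
        intro p hp hb
        exact htnot (List.mem_map.mpr ⟨p, hp, eq_of_beq hb⟩)
      simp only [pvStepA, hc2, Bool.false_eq_true, if_false, PySem.Dict.insert,
        List.map_append, List.map_cons, List.map_nil]
      rw [hk', List.map_append, List.map_cons, List.map_nil]
      congr 1
      congr 1
      · apply List.map_congr_left
        intro t' ht'
        have hne : ¬ t = t' := fun h => hmem (h ▸ ht')
        have hb2 : (t == t') = false := by simpa using hne
        simp [pv_vals_snoc, hb2]
      · simp [pv_vals_snoc, hvalt]

-- ===== VERDICT (by name: the statement is the Claim_ definition above) =====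
theorem processTrainData_spec : Claim_equal_processTrainData := by
  intro carSet timeSet _ hpre
  obtain ⟨hlen, hall⟩ := hpre
  unfold Spec_processTrainData processTrainData processTrainData_alt
  have houter :
      (PySem.List.pyRange 0 (timeSet.length : Int) 1).foldl (fun timeDict timeListidx =>
        let timeList := PySem.List.pyGetD timeSet timeListidx []
        (PySem.List.pyRange 0 (timeList.length : Int) 1).foldl (fun timeDict ind =>
          let actualTime := PySem.List.pyGetD timeList ind ""
          let actualCarNum := PySem.List.pyGetD (PySem.List.pyGetD carSet timeListidx []) ind 0
          pvStepA timeDict actualTime actualCarNum) timeDict) (PySem.Dict.mk [])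
      = (timeSet.zip carSet).foldl (fun d p =>
          (p.1.zip p.2).foldl (fun d q => pvStepA d q.1 q.2) d) (PySem.Dict.mk []) := by
    refine (pv_foldl_range_zip ([] : List String) ([] : List Int)
      (fun d ts cs => (PySem.List.pyRange 0 (ts.length : Int) 1).foldl
        (fun d ind => pvStepA d (PySem.List.pyGetD ts ind "") (PySem.List.pyGetD cs ind 0)) d)
      timeSet carSet hlen (PySem.Dict.mk [])).trans ?_
    apply PySem.List.foldl_congr_mem
    intro acc p hp
    exact pv_foldl_range_zip "" 0 pvStepA p.1 p.2 (by simpa using List.all_eq_true.mp hall p hp) acc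
  rw [houter, ← List.foldl_flatMap]
  rw [pv_fold_groups]
  simp [pvVals]
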